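-- pv_equiv track=rewrite | github.com/wfxronald/chartasis | result_processor.py | get_consecutive_red_blue_count
-- ===== SOURCE A (Python) =====
-- def get_consecutive_red_blue_count(array):
-- 	count = 0
-- 	prev_row = ""
-- 	for row in array:
-- 		if len(row) not in [5, 6, 10]:
-- 			continue
--
-- 		if prev_row != "":
-- 			if len(row) == 5:
-- 				if prev_row[0] != '0' and row[1] != '0':
-- 					count += 1
-- 				if prev_row[1] != '0' and row[0] != '0':
-- 					count += 1
-- 				if prev_row[3] != '0' and row[4] != '0':
-- 					count += 1
-- 				if prev_row[4] != '0' and row[3] != '0':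
-- 					count += 1
--
-- 			if len(row) == 6:
-- 				if prev_row[1] != '0' and row[2] != '0':
-- 					count += 1
-- 				if prev_row[2] != '0' and row[1] != '0':
-- 					count += 1
-- 				if prev_row[3] != '0' and row[4] != '0':
-- 					count += 1
-- 				if prev_row[4] != '0' and row[3] != '0':
-- 					count += 1
--
-- 			elif len(row) == 10:
-- 				if prev_row[0] != '0' and row[1] != '0':
-- 					count += 1
-- 				if prev_row[1] != '0' and row[0] != '0':
-- 					count += 1
-- 				if prev_row[3] != '0' and row[4] != '0':
-- 					count += 1
-- 				if prev_row[4] != '0' and row[3] != '0':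
-- 					count += 1
-- 				if prev_row[5] != '0' and row[6] != '0':
-- 					count += 1
-- 				if prev_row[6] != '0' and row[5] != '0':
-- 					count += 1
-- 				if prev_row[8] != '0' and row[9] != '0':
-- 					count += 1
-- 				if prev_row[9] != '0' and row[8] != '0':
-- 					count += 1
--
-- 		prev_row = row
--
-- 	return count
-- ===== SOURCE B (Python) =====
-- TABLE = [
--     (0, 1, (5, 10)), (1, 0, (5, 10)),
--     (1, 2, (6,)), (2, 1, (6,)),
--     (3, 4, (5, 6, 10)), (4, 3, (5, 6, 10)),
--     (5, 6, (10,)), (6, 5, (10,)),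
--     (8, 9, (10,)), (9, 8, (10,)),
-- ]
--
--
-- def get_consecutive_red_blue_count(array):
--     valid = [r for r in array if len(r) in (5, 6, 10)]
--     pairs = list(zip(valid, valid[1:]))
--     total = 0
--     for i, j, lengths in TABLE:
--         for prev, row in pairs:
--             if len(row) in lengths and prev[i] != '0' and row[j] != '0':
--                 total += 1
--     return total
-- ===== Notes on version B (the rewrite author's own statement) =====
-- stated objective: alternative
-- what changed: Inverts the loop nesting: instead of A's single stateful pass that runs an unrolled per-length if-chain for each row, B precomputes the list of consecutive valid-row pairs once and then makes one separate pass per adjacency index pair (ten staged passes), summing their contributions; the equality rests on exchanging the two summations.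
import Mathlib
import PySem

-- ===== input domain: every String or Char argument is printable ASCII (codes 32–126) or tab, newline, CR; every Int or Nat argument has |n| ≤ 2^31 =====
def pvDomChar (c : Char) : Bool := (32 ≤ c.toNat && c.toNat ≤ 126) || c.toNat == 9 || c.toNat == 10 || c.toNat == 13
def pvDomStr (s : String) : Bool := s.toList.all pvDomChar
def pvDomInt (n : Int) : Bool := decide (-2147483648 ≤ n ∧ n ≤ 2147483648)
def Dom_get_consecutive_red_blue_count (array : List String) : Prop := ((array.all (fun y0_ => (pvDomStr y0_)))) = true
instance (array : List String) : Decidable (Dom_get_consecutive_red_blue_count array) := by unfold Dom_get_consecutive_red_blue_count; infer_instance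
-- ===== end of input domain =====

-- B inverts the loop nesting: it precomputes the consecutive valid-row pairs once and makes
-- one pass per adjacency index pair over them instead of A's single unrolled stateful pass (alternative).

-- ===== PORT A =====
-- `if cond: count += 1`
def pvTick (c : Int) (b : Bool) : Int := if b then c + 1 else c

-- the `count` updates of one loop iteration with prev_row ≠ "" (the three length branches)
def pvA_body (count : Int) (prev row : String) : Int :=
  let c := count
  let c := if PySem.Str.len row = 5 then
      let c := pvTick c ((PySem.Str.pyGet? prev 0 != some '0') && (PySem.Str.pyGet? row 1 != some '0'))
      let c := pvTick c ((PySem.Str.pyGet? prev 1 != some '0') && (PySem.Str.pyGet? row 0 != some '0'))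
      let c := pvTick c ((PySem.Str.pyGet? prev 3 != some '0') && (PySem.Str.pyGet? row 4 != some '0'))
      let c := pvTick c ((PySem.Str.pyGet? prev 4 != some '0') && (PySem.Str.pyGet? row 3 != some '0'))
      c
    else c
  let c := if PySem.Str.len row = 6 then
      let c := pvTick c ((PySem.Str.pyGet? prev 1 != some '0') && (PySem.Str.pyGet? row 2 != some '0'))
      let c := pvTick c ((PySem.Str.pyGet? prev 2 != some '0') && (PySem.Str.pyGet? row 1 != some '0'))
      let c := pvTick c ((PySem.Str.pyGet? prev 3 != some '0') && (PySem.Str.pyGet? row 4 != some '0'))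
      let c := pvTick c ((PySem.Str.pyGet? prev 4 != some '0') && (PySem.Str.pyGet? row 3 != some '0'))
      c
    else if PySem.Str.len row = 10 then
      let c := pvTick c ((PySem.Str.pyGet? prev 0 != some '0') && (PySem.Str.pyGet? row 1 != some '0'))
      let c := pvTick c ((PySem.Str.pyGet? prev 1 != some '0') && (PySem.Str.pyGet? row 0 != some '0'))
      let c := pvTick c ((PySem.Str.pyGet? prev 3 != some '0') && (PySem.Str.pyGet? row 4 != some '0'))
      let c := pvTick c ((PySem.Str.pyGet? prev 4 != some '0') && (PySem.Str.pyGet? row 3 != some '0'))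
      let c := pvTick c ((PySem.Str.pyGet? prev 5 != some '0') && (PySem.Str.pyGet? row 6 != some '0'))
      let c := pvTick c ((PySem.Str.pyGet? prev 6 != some '0') && (PySem.Str.pyGet? row 5 != some '0'))
      let c := pvTick c ((PySem.Str.pyGet? prev 8 != some '0') && (PySem.Str.pyGet? row 9 != some '0'))
      let c := pvTick c ((PySem.Str.pyGet? prev 9 != some '0') && (PySem.Str.pyGet? row 8 != some '0'))
      c
    else c
  c

def pvA_step (st : Int × String) (row : String) : Int × String :=
  if PySem.Str.len row ∈ [(5 : Int), 6, 10] then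
    ((if st.2 ≠ "" then pvA_body st.1 st.2 row else st.1), row)
  else st

def get_consecutive_red_blue_count (array : List String) : Int :=
  (array.foldl pvA_step (0, "")).1

-- ===== PORT B =====
-- Source B's TABLE: (i, j, lengths of the current row for which entry (i, j) applies)
def pvTable : List (Int × Int × List Int) :=
  [(0, 1, [5, 10]), (1, 0, [5, 10]),
   (1, 2, [6]), (2, 1, [6]),
   (3, 4, [5, 6, 10]), (4, 3, [5, 6, 10]),
   (5, 6, [10]), (6, 5, [10]),
   (8, 9, [10]), (9, 8, [10])]

def get_consecutive_red_blue_count_alt (array : List String) : Int :=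
  let valid := array.filter (fun r => decide (PySem.Str.len r ∈ [(5 : Int), 6, 10]))
  let pairs := valid.zip (valid.drop 1)
  pvTable.foldl (fun total t =>
    pairs.foldl (fun tot pr =>
      if t.2.2.contains (PySem.Str.len pr.2)
          && (PySem.Str.pyGet? pr.1 t.1 != some '0')
          && (PySem.Str.pyGet? pr.2 t.2.1 != some '0')
      then tot + 1 else tot) total) 0

-- ===== PRECONDITION & SPEC =====
-- Pre_ excludes exactly the inputs where Python A (and B) raises IndexError: a valid row of
-- length 10 whose preceding valid row is shorter (prev_row[5]/[6]/[8]/[9] is out of range there).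
def Pre_get_consecutive_red_blue_count (array : List String) : Prop :=
  ∀ pr ∈ (array.filter (fun r => PySem.Str.len r ∈ [(5 : Int), 6, 10])).zip
          ((array.filter (fun r => PySem.Str.len r ∈ [(5 : Int), 6, 10])).drop 1),
    PySem.Str.len pr.2 = 10 → PySem.Str.len pr.1 = 10
instance (array : List String) : Decidable (Pre_get_consecutive_red_blue_count array) := by
  unfold Pre_get_consecutive_red_blue_count; infer_instance

def pvWitness_get_consecutive_red_blue_count : List String := ["11111", "101010", "00110"]

def Spec_get_consecutive_red_blue_count (array : List String) (out : Int) : Prop := out = get_consecutive_red_blue_count_alt array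
instance (array : List String) (out : Int) : Decidable (Spec_get_consecutive_red_blue_count array out) := by unfold Spec_get_consecutive_red_blue_count; infer_instance

-- ===== CLAIM (what is proved, stated in full; the proofs are below) =====
def Claim_equal_get_consecutive_red_blue_count : Prop := ∀ (array : List String), Dom_get_consecutive_red_blue_count array → Pre_get_consecutive_red_blue_count array → Spec_get_consecutive_red_blue_count array (get_consecutive_red_blue_count array)

-- ===== LEMMAS AND PROOFS =====

-- the contribution of table entry t to consecutive pair pr
def pvF (pr : String × String) (t : Int × Int × List Int) : Int :=
  if t.2.2.contains (PySem.Str.len pr.2)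
      && (PySem.Str.pyGet? pr.1 t.1 != some '0')
      && (PySem.Str.pyGet? pr.2 t.2.1 != some '0')
  then 1 else 0

-- total contribution of one consecutive pair over the whole table
def pvBpair (p r : String) : Int := (pvTable.map (pvF (p, r))).sum

def pvBcount : List String → Int
  | p :: r :: t => pvBpair p r + pvBcount (r :: t)
  | _ => 0

theorem pvFoldInner (t : Int × Int × List Int) (prs : List (String × String)) (acc : Int) :
    prs.foldl (fun tot pr =>
      if t.2.2.contains (PySem.Str.len pr.2)
          && (PySem.Str.pyGet? pr.1 t.1 != some '0')
          && (PySem.Str.pyGet? pr.2 t.2.1 != some '0')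
      then tot + 1 else tot) acc = acc + (prs.map (fun pr => pvF pr t)).sum := by
  induction prs generalizing acc with
  | nil => simp
  | cons a l ih =>
    simp only [List.foldl_cons, List.map_cons, List.sum_cons, ih, pvF]
    split_ifs <;> omega

theorem pvFoldOuter (ts : List (Int × Int × List Int)) (prs : List (String × String)) (acc : Int) :
    ts.foldl (fun total t =>
      prs.foldl (fun tot pr =>
        if t.2.2.contains (PySem.Str.len pr.2)
            && (PySem.Str.pyGet? pr.1 t.1 != some '0')
            && (PySem.Str.pyGet? pr.2 t.2.1 != some '0')
        then tot + 1 else tot) total) acc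
    = acc + (ts.map (fun t => (prs.map (fun pr => pvF pr t)).sum)).sum := by
  induction ts generalizing acc with
  | nil => simp
  | cons a l ih =>
    rw [List.foldl_cons, pvFoldInner, ih]
    simp only [List.map_cons, List.sum_cons]
    omega

theorem pvSumComm {α β : Type} (f : α → β → Int) (l1 : List α) (l2 : List β) :
    (l1.map (fun a => (l2.map (f a)).sum)).sum
      = (l2.map (fun b => (l1.map (fun a => f a b)).sum)).sum := by
  induction l1 with
  | nil => simp
  | cons a t ih =>
    simp only [List.map_cons, List.sum_cons, ih]
    rw [← List.sum_map_add]

theorem pvZipSum_eq_bcount (l : List String) :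
    ((l.zip (l.drop 1)).map (fun pr => pvBpair pr.1 pr.2)).sum = pvBcount l := by
  induction l with
  | nil => simp [pvBcount]
  | cons a t ih =>
    cases t with
    | nil => simp [pvBcount]
    | cons b t' =>
      simp only [List.drop_succ_cons, List.drop_zero, List.zip_cons_cons, List.map_cons,
        List.sum_cons] at *
      rw [ih]
      simp [pvBcount]

theorem pvB_eq (array : List String) :
    get_consecutive_red_blue_count_alt array
      = pvBcount (array.filter (fun r => decide (PySem.Str.len r ∈ [(5 : Int), 6, 10]))) := by
  unfold get_consecutive_red_blue_count_alt
  rw [pvFoldOuter, pvSumComm]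
  simp only [zero_add]
  have h : ∀ (pr : String × String), (pvTable.map (fun t => pvF pr t)).sum = pvBpair pr.1 pr.2 := by
    intro pr; rfl
  rw [List.map_congr_left (fun pr _ => h pr), pvZipSum_eq_bcount]

theorem pvTick_eq (c : Int) (b : Bool) : pvTick c b = c + (if b then 1 else 0) := by
  unfold pvTick; split_ifs <;> simp

theorem pvBody_eq (c : Int) (p r : String)
    (h : PySem.Str.len r ∈ [(5 : Int), 6, 10]) :
    pvA_body c p r = c + pvBpair p r := by
  simp only [List.mem_cons, List.not_mem_nil, or_false] at h
  rcases h with h | h | h <;>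
  · simp only [pvA_body, pvBpair, pvTable, pvF, h, List.map_cons, List.map_nil, List.sum_cons,
      List.sum_nil, pvTick_eq]
    norm_num
    split_ifs <;> omega

theorem pvValid_ne_empty (r : String) (h : PySem.Str.len r ∈ [(5 : Int), 6, 10]) :
    r ≠ "" := by
  intro he; subst he; revert h; decide

theorem pvLoop_eq (xs : List String) (c : Int) (p : String) :
    (xs.foldl pvA_step (c, p)).1
      = c + (if p = "" then pvBcount (xs.filter (fun r => decide (PySem.Str.len r ∈ [(5 : Int), 6, 10])))
             else pvBcount (p :: xs.filter (fun r => decide (PySem.Str.len r ∈ [(5 : Int), 6, 10])))) := by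
  induction xs generalizing c p with
  | nil => split <;> simp [pvBcount]
  | cons r xs ih =>
    by_cases hv : PySem.Str.len r ∈ [(5 : Int), 6, 10]
    · have hr : r ≠ "" := pvValid_ne_empty r hv
      have hstep : pvA_step (c, p) r = ((if p ≠ "" then pvA_body c p r else c), r) := by
        unfold pvA_step; rw [if_pos hv]
      have hd : decide (PySem.Str.len r ∈ [(5 : Int), 6, 10]) = true := decide_eq_true hv
      have hfil : (r :: xs).filter (fun r => decide (PySem.Str.len r ∈ [(5 : Int), 6, 10]))
          = r :: xs.filter (fun r => decide (PySem.Str.len r ∈ [(5 : Int), 6, 10])) := by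
        simp only [List.filter_cons, hd, if_true]
      rw [List.foldl_cons, hstep, ih, hfil]
      by_cases hp : p = ""
      · simp [hp, hr]
      · have hb : pvBcount (p :: r :: xs.filter (fun r => decide (PySem.Str.len r ∈ [(5 : Int), 6, 10])))
            = pvBpair p r + pvBcount (r :: xs.filter (fun r => decide (PySem.Str.len r ∈ [(5 : Int), 6, 10]))) := rfl
        simp only [if_neg hr, ne_eq, hp, not_false_eq_true, if_pos, hb,
          pvBody_eq c p r hv]
        norm_num
        omega
    · have hstep : pvA_step (c, p) r = (c, p) := by unfold pvA_step; rw [if_neg hv]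
      have hd : decide (PySem.Str.len r ∈ [(5 : Int), 6, 10]) = false := decide_eq_false hv
      have hfil : (r :: xs).filter (fun r => decide (PySem.Str.len r ∈ [(5 : Int), 6, 10]))
          = xs.filter (fun r => decide (PySem.Str.len r ∈ [(5 : Int), 6, 10])) := by
        simp only [List.filter_cons, hd, Bool.false_eq_true, if_false]
      rw [List.foldl_cons, hstep, ih, hfil]

-- ===== VERDICT (by name: the statement is the Claim_ definition above) =====
theorem get_consecutive_red_blue_count_spec : Claim_equal_get_consecutive_red_blue_count := by
  intro array _ _
  unfold Spec_get_consecutive_red_blue_count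
  unfold get_consecutive_red_blue_count
  rw [pvB_eq, pvLoop_eq]
  simp
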